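-- pv_equiv track=rewrite | github.com/richardforrestbarker/DocumentProcessor | Ocr/src/postprocessing/field_extractor.py | _combine_boxes
-- ===== SOURCE A (Python) =====
-- from typing import Dict, Any, List, Optional
--
-- def _combine_boxes(boxes: List[List[int]]) -> Dict[str, int]:
--     """Combine multiple boxes into one bounding box."""
--     if not boxes:
--         return {'x0': 0, 'y0': 0, 'x1': 0, 'y1': 0}
--     return {
--         'x0': min(b[0] for b in boxes),
--         'y0': min(b[1] for b in boxes),
--         'x1': max(b[2] for b in boxes),
--         'y1': max(b[3] for b in boxes)
--     }
-- ===== SOURCE B (Python) =====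
-- from typing import Dict, List, Tuple
--
-- def _bbox(boxes: List[List[int]]) -> Tuple[int, int, int, int]:
--     """Bounding box of a nonempty list of boxes by divide and conquer."""
--     if len(boxes) == 1:
--         b = boxes[0]
--         return (b[0], b[1], b[2], b[3])
--     mid = len(boxes) // 2
--     lx0, ly0, lx1, ly1 = _bbox(boxes[:mid])
--     rx0, ry0, rx1, ry1 = _bbox(boxes[mid:])
--     return (min(lx0, rx0), min(ly0, ry0), max(lx1, rx1), max(ly1, ry1))
--
-- def _combine_boxes(boxes: List[List[int]]) -> Dict[str, int]:
--     """Combine multiple boxes into one bounding box (divide and conquer)."""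
--     if not boxes:
--         return {'x0': 0, 'y0': 0, 'x1': 0, 'y1': 0}
--     x0, y0, x1, y1 = _bbox(boxes)
--     return {'x0': x0, 'y0': y0, 'x1': x1, 'y1': y1}
-- ===== Notes on version B (the rewrite author's own statement) =====
-- stated objective: alternative
-- what changed: Replaces A's four linear min/max generator passes with a recursive divide-and-conquer that splits the list in halves, computes each half's bounding box, and merges the two partial boxes (correct because min/max are associative and commutative).
import Mathlib
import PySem

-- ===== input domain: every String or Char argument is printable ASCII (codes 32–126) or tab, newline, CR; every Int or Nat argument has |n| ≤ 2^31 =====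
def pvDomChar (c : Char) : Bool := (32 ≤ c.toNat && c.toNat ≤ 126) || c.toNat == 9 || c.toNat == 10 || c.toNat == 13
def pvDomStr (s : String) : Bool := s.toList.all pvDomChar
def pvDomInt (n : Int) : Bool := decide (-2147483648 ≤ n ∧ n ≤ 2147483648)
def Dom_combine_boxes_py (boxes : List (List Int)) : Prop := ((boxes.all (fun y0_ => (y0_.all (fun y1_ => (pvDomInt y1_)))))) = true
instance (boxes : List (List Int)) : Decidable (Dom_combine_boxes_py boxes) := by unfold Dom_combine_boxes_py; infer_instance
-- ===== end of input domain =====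

-- B replaces A's four linear min/max passes with a divide-and-conquer that halves the list and merges partial bounding boxes (alternative algorithm, same cost).


-- ===== PORT A =====
-- b[i] for an admitted input (Pre_ guarantees length ≥ 4, so the index is in range; none never occurs)
def pvGetA (b : List Int) (i : Int) : Int := (PySem.List.pyGet? b i).getD 0

def combine_boxes_py (boxes : List (List Int)) : List (String × Int) :=
  if boxes = [] then [("x0", 0), ("y0", 0), ("x1", 0), ("y1", 0)]
  else
    [("x0", (PySem.List.min? (boxes.map fun b => pvGetA b 0) (fun x => x)).getD 0),
     ("y0", (PySem.List.min? (boxes.map fun b => pvGetA b 1) (fun x => x)).getD 0),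
     ("x1", (PySem.List.max? (boxes.map fun b => pvGetA b 2) (fun x => x)).getD 0),
     ("y1", (PySem.List.max? (boxes.map fun b => pvGetA b 3) (fun x => x)).getD 0)]

-- ===== PORT B =====
-- _bbox: divide and conquer on halves; boxes[:mid]/boxes[mid:] with 0 ≤ mid ≤ len are exactly take/drop.
-- The [] case never arises (the callers pass nonempty lists); it is a totality guard only.
def pvBBox (boxes : List (List Int)) : Int × Int × Int × Int :=
  if boxes.length = 1 then
    let b := boxes.headD []
    (pvGetA b 0, pvGetA b 1, pvGetA b 2, pvGetA b 3)
  else if boxes.length = 0 then (0, 0, 0, 0)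
  else
    let mid := boxes.length / 2
    let l := pvBBox (boxes.take mid)
    let r := pvBBox (boxes.drop mid)
    (min l.1 r.1, min l.2.1 r.2.1, max l.2.2.1 r.2.2.1, max l.2.2.2 r.2.2.2)
termination_by boxes.length
decreasing_by
  · simp only [List.length_take]; omega
  · simp only [List.length_drop]; omega

def combine_boxes_py_alt (boxes : List (List Int)) : List (String × Int) :=
  if boxes = [] then [("x0", 0), ("y0", 0), ("x1", 0), ("y1", 0)]
  else
    let s := pvBBox boxes
    [("x0", s.1), ("y0", s.2.1), ("x1", s.2.2.1), ("y1", s.2.2.2)]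

-- ===== PRECONDITION & SPEC =====
-- Pre_ excludes boxes with fewer than 4 coordinates: Python A raises IndexError there (and so does B).
def Pre_combine_boxes_py (boxes : List (List Int)) : Prop :=
  ∀ b ∈ boxes, 4 ≤ b.length
instance (boxes : List (List Int)) : Decidable (Pre_combine_boxes_py boxes) := by
  unfold Pre_combine_boxes_py; infer_instance

def pvWitness_combine_boxes_py : List (List Int) := [[1, 2, 3, 4], [0, 5, 9, 2]]

def Spec_combine_boxes_py (boxes : List (List Int)) (out : List (String × Int)) : Prop := out = combine_boxes_py_alt boxes
instance (boxes : List (List Int)) (out : List (String × Int)) : Decidable (Spec_combine_boxes_py boxes out) := by unfold Spec_combine_boxes_py; infer_instance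

-- ===== CLAIM (what is proved, stated in full; the proofs are below) =====
def Claim_equal_combine_boxes_py : Prop := ∀ (boxes : List (List Int)), Dom_combine_boxes_py boxes → Pre_combine_boxes_py boxes → Spec_combine_boxes_py boxes (combine_boxes_py boxes)

-- ===== LEMMAS AND PROOFS =====

-- the running minimum / maximum of (f b) over a nonempty list
def pvFmin (f : List Int → Int) : List (List Int) → Int
  | [] => 0
  | h :: t => t.foldl (fun a b => min a (f b)) (f h)

def pvFmax (f : List Int → Int) : List (List Int) → Int
  | [] => 0
  | h :: t => t.foldl (fun a b => max a (f b)) (f h)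

theorem foldl_min_pull (f : List Int → Int) (l : List (List Int)) (a b : Int) :
    l.foldl (fun x y => min x (f y)) (min a b) = min a (l.foldl (fun x y => min x (f y)) b) := by
  induction l generalizing b with
  | nil => rfl
  | cons h t ih => simp only [List.foldl_cons, min_assoc, ih]

theorem foldl_max_pull (f : List Int → Int) (l : List (List Int)) (a b : Int) :
    l.foldl (fun x y => max x (f y)) (max a b) = max a (l.foldl (fun x y => max x (f y)) b) := by
  induction l generalizing b with
  | nil => rfl
  | cons h t ih => simp only [List.foldl_cons, max_assoc, ih]

theorem pvFmin_append (f : List Int → Int) (l1 l2 : List (List Int))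
    (h1 : l1 ≠ []) (h2 : l2 ≠ []) :
    pvFmin f (l1 ++ l2) = min (pvFmin f l1) (pvFmin f l2) := by
  cases l1 with
  | nil => exact absurd rfl h1
  | cons x t1 =>
    cases l2 with
    | nil => exact absurd rfl h2
    | cons y t2 =>
      simp only [pvFmin, List.cons_append, List.foldl_append, List.foldl_cons]
      rw [← foldl_min_pull]

theorem pvFmax_append (f : List Int → Int) (l1 l2 : List (List Int))
    (h1 : l1 ≠ []) (h2 : l2 ≠ []) :
    pvFmax f (l1 ++ l2) = max (pvFmax f l1) (pvFmax f l2) := by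
  cases l1 with
  | nil => exact absurd rfl h1
  | cons x t1 =>
    cases l2 with
    | nil => exact absurd rfl h2
    | cons y t2 =>
      simp only [pvFmax, List.cons_append, List.foldl_append, List.foldl_cons]
      rw [← foldl_max_pull]

-- the divide-and-conquer pass computes the four running extrema
theorem pvBBox_eq (boxes : List (List Int)) (hne : boxes ≠ []) :
    pvBBox boxes =
      (pvFmin (fun b => pvGetA b 0) boxes, pvFmin (fun b => pvGetA b 1) boxes,
       pvFmax (fun b => pvGetA b 2) boxes, pvFmax (fun b => pvGetA b 3) boxes) := by
  induction boxes using pvBBox.induct with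
  | case1 boxes h =>
    cases boxes with
    | nil => simp at h
    | cons x t =>
      simp only [List.length_cons] at h
      have ht : t = [] := List.eq_nil_of_length_eq_zero (by omega)
      subst ht
      simp [pvBBox, pvFmin, pvFmax]
  | case2 boxes h1 h0 =>
    exact absurd (List.eq_nil_of_length_eq_zero h0) hne
  | case3 boxes h1 h0 mid ihl ihr =>
    have hm1 : 1 ≤ mid := by
      have : 2 ≤ boxes.length := by omega
      omega
    have hm2 : mid < boxes.length := by omega
    have hts : boxes.take mid ≠ [] := by
      intro h; have := congrArg List.length h
      simp only [List.length_take, List.length_nil] at this; omega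
    have hds : boxes.drop mid ≠ [] := by
      intro h; have := congrArg List.length h
      simp only [List.length_drop, List.length_nil] at this; omega
    have hsplit : boxes = boxes.take mid ++ boxes.drop mid := (List.take_append_drop mid boxes).symm
    rw [pvBBox]
    simp only [if_neg h1, if_neg h0]
    rw [ihl hts, ihr hds]
    conv_rhs => rw [hsplit]
    rw [pvFmin_append _ _ _ hts hds, pvFmin_append _ _ _ hts hds,
        pvFmax_append _ _ _ hts hds, pvFmax_append _ _ _ hts hds]

-- ===== VERDICT (by name: the statement is the Claim_ definition above) =====
theorem combine_boxes_py_spec : Claim_equal_combine_boxes_py := by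
  intro boxes _ _
  unfold Spec_combine_boxes_py combine_boxes_py combine_boxes_py_alt
  cases boxes with
  | nil => rfl
  | cons first rest =>
    have hne : (first :: rest : List (List Int)) ≠ [] := by simp
    simp only [if_neg hne, pvBBox_eq _ hne]
    simp only [List.map_cons, PySem.List.min?_id_cons, PySem.List.max?_id_cons,
      Option.getD_some, pvFmin, pvFmax, List.foldl_map]
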